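-- pv_equiv track=rewrite | github.com/HCAT-Project/re_hcat-server | src/util/text.py | pascal_case_to_under_score
-- ===== SOURCE A (Python) =====
-- def pascal_case_to_under_score(name) -> str:
--     """
--     Converts a string from PascalCase to under_score.
--     :param name: The string to convert.
--     :return: The converted string.
--     """
--
--     def temp():
--         for i, t in enumerate(name):
--             if t.isupper() and i != 0:
--                 yield from "_" + t.lower()
--             else:
--                 yield t.lower()
--
--     return ''.join(temp())
-- ===== SOURCE B (Python) =====
-- def pascal_case_to_under_score(name) -> str:
--     """Convert PascalCase to under_score by splitting into words, then joining."""
--     words = []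
--     cur = []
--     for i, t in enumerate(name):
--         if t.isupper() and i != 0:
--             words.append(cur)
--             cur = [t]
--         else:
--             cur.append(t)
--     words.append(cur)
--     return '_'.join(''.join(word).lower() for word in words)
-- ===== Notes on version B (the rewrite author's own statement) =====
-- stated objective: alternative
-- what changed: A emits lowered chars (with inline underscore prefixes) through a single generator; B instead splits the name into a list of words at uppercase boundaries, then lowers each word and joins them with underscores; batching chars into words avoids A's per-character generator and yield-from overhead.
import Mathlib
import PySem

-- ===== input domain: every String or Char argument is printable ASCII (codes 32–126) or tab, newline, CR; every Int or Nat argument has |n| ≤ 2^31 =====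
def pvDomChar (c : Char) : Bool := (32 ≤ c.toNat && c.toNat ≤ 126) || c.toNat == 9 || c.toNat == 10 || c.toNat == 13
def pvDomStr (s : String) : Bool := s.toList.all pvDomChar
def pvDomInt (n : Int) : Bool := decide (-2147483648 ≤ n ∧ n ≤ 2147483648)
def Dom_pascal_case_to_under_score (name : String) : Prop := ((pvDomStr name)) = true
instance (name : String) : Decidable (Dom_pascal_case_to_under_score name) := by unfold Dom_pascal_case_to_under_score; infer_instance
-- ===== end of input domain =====

-- B changes the decomposition: instead of emitting underscore-prefixed lowered chars inline,
-- it splits the name into words at uppercase boundaries, then lowers each word and joins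
-- them with underscores (objective: alternative).

-- ===== PORT A =====
-- A: generator over enumerate(name) yielding "_"+t.lower() or t.lower(), joined by ''.
def pascal_case_to_under_score (name : String) : String :=
  String.ofList ((PySem.List.enumerate name.toList).flatMap
    (fun p => if PySem.Chars.isupper p.2 && p.1 != 0
              then ['_', PySem.Chars.lowerChar p.2]
              else [PySem.Chars.lowerChar p.2]))

-- ===== PORT B =====
-- B's loop: flush the current word when an uppercase char (i ≠ 0) starts a new word.
def pvWordsLoop (l : List (Int × Char)) (words : List (List Char)) (cur : List Char) :
    List (List Char) :=
  match l with
  | [] => words ++ [cur]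
  | (i, t) :: rest =>
    if PySem.Chars.isupper t && i != 0 then pvWordsLoop rest (words ++ [cur]) [t]
    else pvWordsLoop rest words (cur ++ [t])

def pascal_case_to_under_score_alt (name : String) : String :=
  PySem.Str.join "_"
    ((pvWordsLoop (PySem.List.enumerate name.toList) [] []).map
      (fun w => PySem.Str.lower (String.ofList w)))

-- ===== PRECONDITION & SPEC =====
def Spec_pascal_case_to_under_score (name : String) (out : String) : Prop := out = pascal_case_to_under_score_alt name
instance (name : String) (out : String) : Decidable (Spec_pascal_case_to_under_score name out) := by unfold Spec_pascal_case_to_under_score; infer_instance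

-- ===== CLAIM (what is proved, stated in full; the proofs are below) =====
def Claim_equal_pascal_case_to_under_score : Prop := ∀ (name : String), Dom_pascal_case_to_under_score name → Spec_pascal_case_to_under_score name (pascal_case_to_under_score name)

-- ===== LEMMAS AND PROOFS =====

-- joining after appending one more word inserts one separator
theorem pv_join_snoc (sep : List Char) (a : List Char) :
    ∀ (ws : List (List Char)) (w : List Char),
      PySem.Chars.join sep ((a :: ws) ++ [w]) =
        PySem.Chars.join sep (a :: ws) ++ sep ++ w := by
  intro ws
  induction ws generalizing a with
  | nil => intro w; simp [PySem.Chars.join_cons_cons, PySem.Chars.join_singleton]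
  | cons b ws ih =>
    intro w
    have ihb := ih b w
    simp only [List.cons_append] at ihb
    simp only [List.cons_append]
    rw [PySem.Chars.join_cons_cons sep a b (ws ++ [w]), ihb,
        PySem.Chars.join_cons_cons sep a b ws]
    simp [List.append_assoc]

-- extending the last word appends its characters after the join
theorem pv_join_last_append (sep : List Char) :
    ∀ (ws : List (List Char)) (w x : List Char),
      PySem.Chars.join sep (ws ++ [w ++ x]) =
        PySem.Chars.join sep (ws ++ [w]) ++ x := by
  intro ws
  induction ws with
  | nil => intro w x; simp [PySem.Chars.join_singleton]
  | cons a ws ih =>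
    intro w x
    cases ws with
    | nil =>
      simp [PySem.Chars.join_cons_cons, PySem.Chars.join_singleton, List.append_assoc]
    | cons b ws2 =>
      have ihb := ih w x
      simp only [List.cons_append] at ihb
      simp only [List.cons_append]
      rw [PySem.Chars.join_cons_cons sep a b (ws2 ++ [w ++ x]),
          PySem.Chars.join_cons_cons sep a b (ws2 ++ [w]), ihb]
      simp [List.append_assoc]

-- the invariant of B's loop: joining the lowered words so far plus A's remaining output
theorem pv_loop_join :
    ∀ (l : List (Int × Char)) (words : List (List Char)) (cur : List Char),
      (∀ p ∈ l, p.1 ≠ 0) →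
      PySem.Chars.join ['_'] ((pvWordsLoop l words cur).map PySem.Chars.lower) =
        PySem.Chars.join ['_'] ((words ++ [cur]).map PySem.Chars.lower) ++
          l.flatMap (fun p => if PySem.Chars.isupper p.2 && p.1 != 0
                              then ['_', PySem.Chars.lowerChar p.2]
                              else [PySem.Chars.lowerChar p.2]) := by
  intro l
  induction l with
  | nil => intro words cur _; simp [pvWordsLoop]
  | cons p rest ih =>
    intro words cur h
    obtain ⟨i, t⟩ := p
    have hi : i ≠ 0 := h (i, t) (by simp)
    have hib : (i != 0) = true := by simpa using hi
    by_cases hu : PySem.Chars.isupper t = true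
    · have hcond : (PySem.Chars.isupper t && i != 0) = true := by simp [hu, hib]
      rw [pvWordsLoop, if_pos hcond, ih _ _ (fun q hq => h q (by simp [hq]))]
      rw [List.flatMap_cons]
      simp only [hcond, if_pos]
      have hmap : ((words ++ [cur]) ++ [[t]]).map PySem.Chars.lower =
          ((words ++ [cur]).map PySem.Chars.lower) ++ [PySem.Chars.lower [t]] := by simp
      have hne : ∃ a ws, (words ++ [cur]).map PySem.Chars.lower = a :: ws := by
        cases words with
        | nil => exact ⟨_, _, rfl⟩
        | cons a ws => exact ⟨_, _, rfl⟩
      obtain ⟨a, ws, hws⟩ := hne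
      have : (words ++ [cur] ++ [[t]]).map PySem.Chars.lower =
          (a :: ws) ++ [PySem.Chars.lower [t]] := by rw [hmap, hws]
      rw [this, pv_join_snoc, ← hws]
      simp [PySem.Chars.lower, List.append_assoc]
    · have hcond : (PySem.Chars.isupper t && i != 0) = false := by
        simp [Bool.eq_false_iff.mpr hu]
      rw [pvWordsLoop, if_neg (by simp [hcond]), ih _ _ (fun q hq => h q (by simp [hq]))]
      rw [List.flatMap_cons]
      simp only [hcond, Bool.false_eq_true, if_false]
      have hmap : (words ++ [cur ++ [t]]).map PySem.Chars.lower =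
          (words.map PySem.Chars.lower) ++
            [PySem.Chars.lower cur ++ [PySem.Chars.lowerChar t]] := by
        simp [PySem.Chars.lower]
      have hmap2 : (words ++ [cur]).map PySem.Chars.lower =
          (words.map PySem.Chars.lower) ++ [PySem.Chars.lower cur] := by simp
      rw [hmap, pv_join_last_append, ← hmap2]
      simp [List.append_assoc]

-- ===== VERDICT (by name: the statement is the Claim_ definition above) =====
theorem pascal_case_to_under_score_spec : Claim_equal_pascal_case_to_under_score := by
  intro name _
  unfold Spec_pascal_case_to_under_score
  apply String.toList_inj.mp
  rw [pascal_case_to_under_score, pascal_case_to_under_score_alt]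
  rw [PySem.Str.toList_join]
  have hmap : ((pvWordsLoop (PySem.List.enumerate name.toList) [] []).map
        (fun w => PySem.Str.lower (String.ofList w))).map String.toList =
      (pvWordsLoop (PySem.List.enumerate name.toList) [] []).map PySem.Chars.lower := by
    simp [PySem.Str.toList_lower]
  rw [hmap]
  cases hl : name.toList with
  | nil =>
    simp [PySem.List.enumerate, pvWordsLoop, PySem.Chars.join_singleton, PySem.Chars.lower]
  | cons c cs =>
    rw [PySem.List.enumerate_cons]
    have h0 : (PySem.Chars.isupper c && (0 : Int) != 0) = false := by simp
    rw [pvWordsLoop, if_neg (by simp), List.flatMap_cons]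
    simp only [h0, Bool.false_eq_true, if_false]
    have hsep : ("_" : String).toList = ['_'] := by decide
    rw [hsep, pv_loop_join _ [] ([] ++ [c]) ?_]
    · simp [PySem.Chars.join_singleton, PySem.Chars.lower]
    · intro p hp
      rw [PySem.List.mem_enumerate_iff] at hp
      obtain ⟨k, _, rfl⟩ := hp
      simp only []
      omega
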